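-- pv_equiv track=rewrite | github.com/ash3spho3nix/hybrid_code_analyser | analyzer_cli/error_handler.py | determine_exit_code
-- ===== SOURCE A (Python) =====
-- from typing import Dict, Any, List, Optional
--
-- SUCCESS = 0
--
-- PARTIAL_ISSUES = 1
--
-- CRITICAL_FAILURE = 2
--
-- TIMEOUT_ERROR = 3
--
-- INPUT_ERROR = 4
--
-- def determine_exit_code(errors: List[Dict[str, Any]]) -> int:
--     """Determine appropriate exit code based on errors"""
--     if not errors:
--         return SUCCESS
--
--     # Check for critical errors
--     critical_errors = [e for e in errors if e.get("severity") == "critical"]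
--     if critical_errors:
--         return CRITICAL_FAILURE
--
--     # Check for timeout errors
--     timeout_errors = [e for e in errors if e.get("error_type") == "timeout"]
--     if timeout_errors:
--         return TIMEOUT_ERROR
--
--     # Check for input errors
--     input_errors = [e for e in errors if e.get("error_type") in ["file_not_found", "permission_denied"]]
--     if input_errors:
--         return INPUT_ERROR
--
--     # Partial issues (some analysis completed)
--     return PARTIAL_ISSUES
-- ===== SOURCE B (Python) =====
-- SUCCESS = 0
-- PARTIAL_ISSUES = 1
-- CRITICAL_FAILURE = 2
-- TIMEOUT_ERROR = 3
-- INPUT_ERROR = 4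
--
-- def _rank(e):
--     """Numeric severity rank of one error record (higher = more severe)."""
--     if e.get("severity") == "critical":
--         return 3
--     if e.get("error_type") == "timeout":
--         return 2
--     if e.get("error_type") in ("file_not_found", "permission_denied"):
--         return 1
--     return 0
--
-- def determine_exit_code(errors):
--     """Reduce the list to its maximal severity rank, then map the rank
--     to the exit code arithmetically (rank m>0 -> 5-m, rank 0 -> PARTIAL_ISSUES)."""
--     if not errors:
--         return SUCCESS
--     m = 0
--     for e in errors:
--         m = max(m, _rank(e))
--     return 5 - m if m else PARTIAL_ISSUES
-- ===== Notes on version B (the rewrite author's own statement) =====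
-- stated objective: alternative
-- what changed: B replaces A's up-to-three separate filter scans and if-chain by mapping each error to a numeric severity rank, reducing the list with max, and converting the maximal rank to the exit code arithmetically (5 - m for m > 0).
import Mathlib
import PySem

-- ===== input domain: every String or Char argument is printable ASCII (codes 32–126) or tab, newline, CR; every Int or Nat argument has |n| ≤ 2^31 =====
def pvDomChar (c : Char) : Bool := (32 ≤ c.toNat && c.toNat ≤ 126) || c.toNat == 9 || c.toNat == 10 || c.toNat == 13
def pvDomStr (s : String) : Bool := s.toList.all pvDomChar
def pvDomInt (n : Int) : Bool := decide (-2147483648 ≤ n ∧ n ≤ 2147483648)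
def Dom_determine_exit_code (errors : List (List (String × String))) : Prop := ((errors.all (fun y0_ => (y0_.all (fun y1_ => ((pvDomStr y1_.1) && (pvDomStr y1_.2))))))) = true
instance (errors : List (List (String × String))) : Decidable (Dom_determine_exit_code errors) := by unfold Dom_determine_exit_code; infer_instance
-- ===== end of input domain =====

-- B maps each error to a numeric severity rank, takes the maximum, and converts it arithmetically to the exit code; return value only, no side effects.

-- ===== PORT A =====
-- e.get(k): first match in the association list (Python dict lookup)
def pyGetA (e : List (String × String)) (k : String) : Option String :=
  (e.find? (fun p => p.1 == k)).map (·.2)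

def determine_exit_code (errors : List (List (String × String))) : Int :=
  if errors.isEmpty then 0
  else
    let critical_errors := errors.filter (fun e => pyGetA e "severity" == some "critical")
    if !critical_errors.isEmpty then 2
    else
      let timeout_errors := errors.filter (fun e => pyGetA e "error_type" == some "timeout")
      if !timeout_errors.isEmpty then 3
      else
        let input_errors := errors.filter (fun e =>
          pyGetA e "error_type" == some "file_not_found" || pyGetA e "error_type" == some "permission_denied")
        if !input_errors.isEmpty then 4
        else 1

-- ===== PORT B =====
def pyGetB (e : List (String × String)) (k : String) : Option String :=
  (e.find? (fun p => p.1 == k)).map (·.2)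

-- _rank: numeric severity rank of one error record
def rankB (e : List (String × String)) : Int :=
  if pyGetB e "severity" == some "critical" then 3
  else if pyGetB e "error_type" == some "timeout" then 2
  else if pyGetB e "error_type" == some "file_not_found" || pyGetB e "error_type" == some "permission_denied" then 1
  else 0

def determine_exit_code_alt (errors : List (List (String × String))) : Int :=
  if errors.isEmpty then 0
  else
    let m := errors.foldl (fun m e => max m (rankB e)) 0
    if m ≠ 0 then 5 - m else 1

-- ===== PRECONDITION & SPEC =====
def Spec_determine_exit_code (errors : List (List (String × String))) (out : Int) : Prop := out = determine_exit_code_alt errors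
instance (errors : List (List (String × String))) (out : Int) : Decidable (Spec_determine_exit_code errors out) := by unfold Spec_determine_exit_code; infer_instance

-- ===== CLAIM (what is proved, stated in full; the proofs are below) =====
def Claim_equal_determine_exit_code : Prop := ∀ (errors : List (List (String × String))), Dom_determine_exit_code errors → Spec_determine_exit_code errors (determine_exit_code errors)

-- ===== LEMMAS AND PROOFS =====

theorem rankB_nonneg (e : List (String × String)) : 0 ≤ rankB e := by
  unfold rankB; split_ifs <;> norm_num

theorem rankB_le (e : List (String × String)) : rankB e ≤ 3 := by
  unfold rankB; split_ifs <;> norm_num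

-- abbreviation for B's fold
def maxRank (l : List (List (String × String))) : Int :=
  l.foldl (fun m e => max m (rankB e)) 0

theorem foldl_max_init (l : List (List (String × String))) (a : Int) (ha : 0 ≤ a) :
    l.foldl (fun m e => max m (rankB e)) a = max a (maxRank l) := by
  induction l generalizing a with
  | nil => unfold maxRank; simp; omega
  | cons x xs ih =>
    have hx := rankB_nonneg x
    have h1 := ih (max a (rankB x)) (by omega)
    have h2 := ih (max 0 (rankB x)) (by omega)
    unfold maxRank
    simp only [List.foldl]
    rw [h1, h2]
    omega

theorem maxRank_cons (x : List (String × String)) (xs : List (List (String × String))) :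
    maxRank (x :: xs) = max (rankB x) (maxRank xs) := by
  have hx := rankB_nonneg x
  have h := foldl_max_init xs (max 0 (rankB x)) (by omega)
  have e : maxRank (x :: xs) = xs.foldl (fun m e => max m (rankB e)) (max 0 (rankB x)) := rfl
  rw [e, h]
  omega

theorem maxRank_nonneg (l : List (List (String × String))) : 0 ≤ maxRank l := by
  induction l with
  | nil => simp [maxRank]
  | cons x xs ih => rw [maxRank_cons]; have := rankB_nonneg x; omega

theorem maxRank_le (l : List (List (String × String))) : maxRank l ≤ 3 := by
  induction l with
  | nil => simp [maxRank]
  | cons x xs ih => rw [maxRank_cons]; have := rankB_le x; omega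

-- the list has an element of rank ≥ k  ⟺  the maximal rank is ≥ k (for k ≥ 1)
theorem any_ge_iff (l : List (List (String × String))) (k : Int) (hk : 1 ≤ k)
    (p : List (String × String) → Bool) (hp : ∀ e, p e = decide (k ≤ rankB e)) :
    l.any p = decide (k ≤ maxRank l) := by
  induction l with
  | nil => simp [maxRank]; omega
  | cons x xs ih =>
    rw [List.any_cons, ih, maxRank_cons, hp]
    by_cases h : k ≤ rankB x <;> by_cases h' : k ≤ maxRank xs <;> simp_all

theorem pcrit_spec (e : List (String × String)) :
    (pyGetB e "severity" == some "critical") = decide (3 ≤ rankB e) := by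
  unfold rankB; split_ifs with h1 h2 h3 <;> simp_all

theorem ptmo_spec (e : List (String × String)) :
    ((pyGetB e "severity" == some "critical") || (pyGetB e "error_type" == some "timeout"))
      = decide (2 ≤ rankB e) := by
  unfold rankB; split_ifs with h1 h2 h3 <;> simp_all

theorem pinp_spec (e : List (String × String)) :
    ((pyGetB e "severity" == some "critical") || (pyGetB e "error_type" == some "timeout")
      || (pyGetB e "error_type" == some "file_not_found" || pyGetB e "error_type" == some "permission_denied"))
      = decide (1 ≤ rankB e) := by
  unfold rankB; split_ifs with h1 h2 h3 <;> simp_all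

theorem not_isEmpty_filter {α : Type} (p : α → Bool) (xs : List α) :
    (!(xs.filter p).isEmpty) = xs.any p := by
  induction xs with
  | nil => simp
  | cons x rest ih => by_cases h : p x <;> simp [List.filter, h, ih]

theorem any_or_split {α : Type} (p q : α → Bool) (l : List α) :
    l.any (fun x => p x || q x) = (l.any p || l.any q) := by
  induction l with
  | nil => simp
  | cons x xs ih => simp [List.any_cons, ih, Bool.or_assoc, Bool.or_left_comm]

theorem determine_exit_code_spec : Claim_equal_determine_exit_code := by
  intro errors _
  unfold Spec_determine_exit_code determine_exit_code determine_exit_code_alt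
  have hAB : pyGetA = pyGetB := rfl
  by_cases hemp : errors.isEmpty
  · simp [hemp]
  · simp only [hemp, not_isEmpty_filter, hAB]
    have h3 := any_ge_iff errors 3 (by norm_num) _ pcrit_spec
    have h2 := any_ge_iff errors 2 (by norm_num) _ ptmo_spec
    have h1 := any_ge_iff errors 1 (by norm_num) _ pinp_spec
    rw [show (fun e => (pyGetB e "severity" == some "critical") || (pyGetB e "error_type" == some "timeout"))
          = (fun e => (fun e => pyGetB e "severity" == some "critical") e || (fun e => pyGetB e "error_type" == some "timeout") e) from rfl,
        any_or_split] at h2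
    rw [show (fun e => (pyGetB e "severity" == some "critical") || (pyGetB e "error_type" == some "timeout")
            || (pyGetB e "error_type" == some "file_not_found" || pyGetB e "error_type" == some "permission_denied"))
          = (fun e => ((fun e => (pyGetB e "severity" == some "critical") || (pyGetB e "error_type" == some "timeout")) e
              || (fun e => pyGetB e "error_type" == some "file_not_found" || pyGetB e "error_type" == some "permission_denied") e)) from rfl,
        any_or_split, any_or_split] at h1
    have hub := maxRank_le errors
    have hlb := maxRank_nonneg errors
    rw [show (errors.foldl (fun m e => max m (rankB e)) 0) = maxRank errors from rfl]
    set M := maxRank errors with hM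
    set a := errors.any (fun e => pyGetB e "severity" == some "critical") with ha'
    set b := errors.any (fun e => pyGetB e "error_type" == some "timeout") with hb'
    set c := errors.any (fun e => pyGetB e "error_type" == some "file_not_found" || pyGetB e "error_type" == some "permission_denied") with hc'
    cases ha : a <;> cases hb : b <;> cases hc : c <;>
      simp_all <;> (try split_ifs) <;> omega

-- ===== VERDICT (by name: the statement is the Claim_ definition above) =====
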